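-- pv_equiv track=rewrite | github.com/arnold117/LitScribe | src/agents/prompts.py | format_papers_for_self_review
-- ===== SOURCE A (Python) =====
-- def format_papers_for_self_review(papers: list, max_chars: int = 12000) -> str:
--     """Format paper list for self-review prompt.
--
--     Includes paper_id, title, year, source, relevance_score, and abstract snippet.
--     Truncates to max_chars to prevent prompt overflow with large paper sets.
--
--     Args:
--         papers: List of PaperSummary or paper dicts
--         max_chars: Maximum characters to include
--
--     Returns:
--         Formatted string of papers for self-review
--     """
--     lines = []
--     total_chars = 0
--
--     for i, paper in enumerate(papers, 1):
--         paper_id = paper.get("paper_id", "unknown")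
--         title = paper.get("title", "Unknown Title")
--         year = paper.get("year", "N/A")
--         source = paper.get("source", "unknown")
--         relevance = paper.get("relevance_score", "N/A")
--         abstract = paper.get("abstract", "")[:150]
--         if abstract:
--             abstract = f" | Abstract: {abstract}..."
--
--         line = f"{i}. [{paper_id}] {title} ({year}) [source: {source}, relevance: {relevance}]{abstract}"
--
--         if total_chars + len(line) > max_chars:
--             lines.append(f"... and {len(papers) - i + 1} more papers")
--             break
--
--         lines.append(line)
--         total_chars += len(line)
--
--     return "\n".join(lines)
-- ===== SOURCE B (Python) =====
-- def format_papers_for_self_review(papers: list, max_chars: int = 12000) -> str: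
--     # Format every paper into its final line.
--     lines = []
--     for i, paper in enumerate(papers, 1):
--         paper_id = paper.get("paper_id", "unknown")
--         title = paper.get("title", "Unknown Title")
--         year = paper.get("year", "N/A")
--         source = paper.get("source", "unknown")
--         relevance = paper.get("relevance_score", "N/A")
--         abstract = paper.get("abstract", "")[:150]
--         if abstract:
--             abstract = f" | Abstract: {abstract}..."
--         lines.append(f"{i}. [{paper_id}] {title} ({year}) [source: {source}, relevance: {relevance}]{abstract}")
--     # Prefix sums of line lengths: prefix[k] = total length of the first k lines.
--     prefix = [0]
--     for line in lines:
--         prefix.append(prefix[-1] + len(line))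
--     # Binary search the largest k with prefix[k] <= max_chars (prefix is
--     # non-decreasing, so the fitting prefix lengths form a downward-closed set).
--     lo, hi = 0, len(lines)
--     while lo < hi:
--         mid = (lo + hi + 1) // 2
--         if prefix[mid] <= max_chars:
--             lo = mid
--         else:
--             hi = mid - 1
--     k = lo
--     if k < len(lines):
--         return "\n".join(lines[:k] + [f"... and {len(lines) - k} more papers"])
--     return "\n".join(lines)
-- ===== Notes on version B (the rewrite author's own statement) =====
-- stated objective: alternative
-- what changed: B replaces A's fused format-and-budget loop with a different algorithm: it formats all lines, builds a prefix-sum array of line lengths, binary-searches for the largest prefix that fits max_chars, and assembles the result by slicing lines[:k] plus the tail line.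
import Mathlib
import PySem

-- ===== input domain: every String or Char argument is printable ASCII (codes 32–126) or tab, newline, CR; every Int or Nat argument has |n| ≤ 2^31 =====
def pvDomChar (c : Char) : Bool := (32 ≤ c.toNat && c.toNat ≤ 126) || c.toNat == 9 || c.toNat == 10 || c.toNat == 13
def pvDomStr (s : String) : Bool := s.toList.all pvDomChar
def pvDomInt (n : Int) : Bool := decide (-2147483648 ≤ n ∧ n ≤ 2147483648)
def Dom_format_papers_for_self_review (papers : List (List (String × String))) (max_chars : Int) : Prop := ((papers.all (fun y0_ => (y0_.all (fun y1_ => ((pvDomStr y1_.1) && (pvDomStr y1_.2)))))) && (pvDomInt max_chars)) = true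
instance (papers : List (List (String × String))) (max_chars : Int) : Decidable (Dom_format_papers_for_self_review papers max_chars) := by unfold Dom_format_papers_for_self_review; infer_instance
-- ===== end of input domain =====

-- B replaces A's fused format-and-budget loop by prefix sums of line lengths plus a binary search for the cutoff index (objective: alternative algorithm, same cost).


-- ===== PORT A =====
-- A's single loop: formats each paper and tracks a growing total_chars, breaking with the tail line on overflow.
def pvLoopA (n max_chars : Int) : List (List (String × String)) → Int → Int → List String
  | [], _, _ => []
  | paper :: rest, i, total =>
      let paper_id := (PySem.Dict.mk paper).getD "paper_id" "unknown"
      let title := (PySem.Dict.mk paper).getD "title" "Unknown Title"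
      let year := (PySem.Dict.mk paper).getD "year" "N/A"
      let source := (PySem.Dict.mk paper).getD "source" "unknown"
      let relevance := (PySem.Dict.mk paper).getD "relevance_score" "N/A"
      let a0 := PySem.Str.slice ((PySem.Dict.mk paper).getD "abstract" "") none (some 150)
      let abstract := if a0 = "" then a0 else " | Abstract: " ++ a0 ++ "..."
      let line := PySem.Int.toStr i ++ ". [" ++ paper_id ++ "] " ++ title ++ " (" ++ year ++ ") [source: " ++ source ++ ", relevance: " ++ relevance ++ "]" ++ abstract
      if total + PySem.Str.len line > max_chars then
        ["... and " ++ PySem.Int.toStr (n - i + 1) ++ " more papers"]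
      else line :: pvLoopA n max_chars rest (i + 1) (total + PySem.Str.len line)

def format_papers_for_self_review (papers : List (List (String × String))) (max_chars : Int) : String :=
  PySem.Str.join "\n" (pvLoopA (PySem.List.len papers) max_chars papers 1 0)

-- ===== PORT B =====
-- B's formatting pass: one paper to its final line.
def pvFmtPaper (i : Int) (paper : List (String × String)) : String :=
  let paper_id := (PySem.Dict.mk paper).getD "paper_id" "unknown"
  let title := (PySem.Dict.mk paper).getD "title" "Unknown Title"
  let year := (PySem.Dict.mk paper).getD "year" "N/A"
  let source := (PySem.Dict.mk paper).getD "source" "unknown"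
  let relevance := (PySem.Dict.mk paper).getD "relevance_score" "N/A"
  let a0 := PySem.Str.slice ((PySem.Dict.mk paper).getD "abstract" "") none (some 150)
  let abstract := if a0 = "" then a0 else " | Abstract: " ++ a0 ++ "..."
  PySem.Int.toStr i ++ ". [" ++ paper_id ++ "] " ++ title ++ " (" ++ year ++ ") [source: " ++ source ++ ", relevance: " ++ relevance ++ "]" ++ abstract

-- the 'lines' loop of Source B
def pvFmtLines : List (List (String × String)) → Int → List String
  | [], _ => []
  | p :: rest, i => pvFmtPaper i p :: pvFmtLines rest (i + 1)

-- Source B's prefix list: prefix = [0]; for line in lines: prefix.append(prefix[-1] + len(line))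
def pvPrefixGo (s : Int) : List String → List Int
  | [] => [s]
  | l :: r => s :: pvPrefixGo (s + PySem.Str.len l) r

def pvPrefix (lines : List String) : List Int := pvPrefixGo 0 lines

-- Source B's binary search: largest k with prefix[k] <= max_chars
def pvBsearch (pre : List Int) (mc : Int) (lo hi : Int) : Int :=
  if h : lo < hi then
    if (PySem.List.pyGet? pre (PySem.Int.floordiv (lo + hi + 1) 2)).getD 0 ≤ mc then
      pvBsearch pre mc (PySem.Int.floordiv (lo + hi + 1) 2) hi
    else
      pvBsearch pre mc lo (PySem.Int.floordiv (lo + hi + 1) 2 - 1)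
  else lo
termination_by (hi - lo).toNat
decreasing_by
  · have hb := PySem.Int.floordiv_two_mid_bounds (lo := lo + 1) (hi := hi) (by omega)
    have e : lo + 1 + hi = lo + hi + 1 := by ring
    rw [e] at hb
    omega
  · have hb := PySem.Int.floordiv_two_mid_bounds (lo := lo + 1) (hi := hi) (by omega)
    have e : lo + 1 + hi = lo + hi + 1 := by ring
    rw [e] at hb
    omega

def format_papers_for_self_review_alt (papers : List (List (String × String))) (max_chars : Int) : String :=
  let lines := pvFmtLines papers 1
  let pre := pvPrefix lines
  let k := pvBsearch pre max_chars 0 (PySem.List.len lines)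
  if k < PySem.List.len lines then
    PySem.Str.join "\n" (PySem.List.slice lines none (some k) ++
      ["... and " ++ PySem.Int.toStr (PySem.List.len lines - k) ++ " more papers"])
  else
    PySem.Str.join "\n" lines

-- ===== PRECONDITION & SPEC =====
def Spec_format_papers_for_self_review (papers : List (List (String × String))) (max_chars : Int) (out : String) : Prop := out = format_papers_for_self_review_alt papers max_chars
instance (papers : List (List (String × String))) (max_chars : Int) (out : String) : Decidable (Spec_format_papers_for_self_review papers max_chars out) := by unfold Spec_format_papers_for_self_review; infer_instance

-- ===== CLAIM (what is proved, stated in full; the proofs are below) =====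
def Claim_equal_format_papers_for_self_review : Prop := ∀ (papers : List (List (String × String))) (max_chars : Int), Dom_format_papers_for_self_review papers max_chars → Spec_format_papers_for_self_review papers max_chars (format_papers_for_self_review papers max_chars)

-- ===== LEMMAS AND PROOFS =====

-- Proof-side view of A's loop acting on already-formatted lines.
def pvF (n : Int) : List String → Int → Int → List String
  | [], _, _ => []
  | line :: rest, idx, remaining =>
      if PySem.Str.len line > remaining then
        ["... and " ++ PySem.Int.toStr (n - idx + 1) ++ " more papers"]
      else line :: pvF n rest (idx + 1) (remaining - PySem.Str.len line)

-- Number of leading lines that fit the budget.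
def pvG : List String → Int → Nat
  | [], _ => 0
  | l :: r, rem => if PySem.Str.len l > rem then 0 else pvG r (rem - PySem.Str.len l) + 1

-- Total length of the first k lines.
def pvP (lines : List String) (k : Nat) : Int := ((lines.take k).map PySem.Str.len).sum

lemma pvFmtLines_len (ps : List (List (String × String))) : ∀ i, (pvFmtLines ps i).length = ps.length := by
  induction ps with
  | nil => intro i; rfl
  | cons p rest ih => intro i; simpa [pvFmtLines] using ih (i + 1)

lemma pvLoopA_eq_pvF (n mc : Int) (ps : List (List (String × String))) :
    ∀ i total, pvLoopA n mc ps i total = pvF n (pvFmtLines ps i) i (mc - total) := by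
  induction ps with
  | nil => intro i total; rfl
  | cons p rest ih =>
      intro i total
      have hA : pvLoopA n mc (p :: rest) i total =
          (if total + PySem.Str.len (pvFmtPaper i p) > mc then
            ["... and " ++ PySem.Int.toStr (n - i + 1) ++ " more papers"]
          else pvFmtPaper i p :: pvLoopA n mc rest (i + 1) (total + PySem.Str.len (pvFmtPaper i p))) := rfl
      have hB : pvF n (pvFmtLines (p :: rest) i) i (mc - total) =
          (if PySem.Str.len (pvFmtPaper i p) > mc - total then
            ["... and " ++ PySem.Int.toStr (n - i + 1) ++ " more papers"]
          else pvFmtPaper i p :: pvF n (pvFmtLines rest (i + 1)) (i + 1) (mc - total - PySem.Str.len (pvFmtPaper i p))) := rfl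
      rw [hA, hB]
      by_cases h : total + PySem.Str.len (pvFmtPaper i p) > mc
      · rw [if_pos h, if_pos (by omega)]
      · have hr : mc - total - PySem.Str.len (pvFmtPaper i p) = mc - (total + PySem.Str.len (pvFmtPaper i p)) := by omega
        rw [if_neg h, if_neg (by omega), ih (i + 1) (total + PySem.Str.len (pvFmtPaper i p)), hr]

lemma pvF_char (n : Int) (lines : List String) :
    ∀ idx rem, pvF n lines idx rem =
      lines.take (pvG lines rem) ++
        (if pvG lines rem < lines.length then
          ["... and " ++ PySem.Int.toStr (n - (idx + (pvG lines rem : Int)) + 1) ++ " more papers"]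
        else []) := by
  induction lines with
  | nil => intro idx rem; simp [pvF, pvG]
  | cons l r ih =>
      intro idx rem
      by_cases h : PySem.Str.len l > rem
      · simp only [pvF, pvG, if_pos h]
        simp
      · simp only [pvF, pvG, if_neg h]
        rw [ih (idx + 1) (rem - PySem.Str.len l)]
        have hlen : pvG r (rem - PySem.Str.len l) + 1 < (l :: r).length ↔
            pvG r (rem - PySem.Str.len l) < r.length := by simp
        by_cases hc : pvG r (rem - PySem.Str.len l) < r.length
        · rw [if_pos hc, if_pos (hlen.mpr hc)]
          have harg : n - (idx + 1 + (pvG r (rem - PySem.Str.len l) : Int)) + 1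
              = n - (idx + ((pvG r (rem - PySem.Str.len l) + 1 : Nat) : Int)) + 1 := by
            push_cast; ring
          simp only [List.take_succ_cons, List.cons_append, harg]
        · rw [if_neg hc, if_neg (fun hh => hc (hlen.mp hh))]
          simp [List.take_succ_cons]

lemma pvG_le (lines : List String) : ∀ rem, pvG lines rem ≤ lines.length := by
  induction lines with
  | nil => intro rem; simp [pvG]
  | cons l r ih =>
      intro rem
      by_cases h : PySem.Str.len l > rem
      · simp only [pvG, if_pos h]; omega
      · simp only [pvG, if_neg h, List.length_cons]
        exact Nat.succ_le_succ (ih _)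

lemma pvP_nonneg (lines : List String) (k : Nat) : 0 ≤ pvP lines k := by
  apply List.sum_nonneg
  intro x hx
  obtain ⟨s, _, rfl⟩ := List.mem_map.mp hx
  simp [PySem.Str.len_eq]

lemma pvP_succ_cons (l : String) (r : List String) (k : Nat) :
    pvP (l :: r) (k + 1) = PySem.Str.len l + pvP r k := by
  simp [pvP, List.take_succ_cons]

lemma pvP_le_of_le_g (lines : List String) :
    ∀ rem k, 1 ≤ k → k ≤ pvG lines rem → pvP lines k ≤ rem := by
  induction lines with
  | nil => intro rem k h1 h2; simp [pvG] at h2; omega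
  | cons l r ih =>
      intro rem k h1 h2
      by_cases h : PySem.Str.len l > rem
      · simp only [pvG, if_pos h] at h2; omega
      · simp only [pvG, if_neg h] at h2
        obtain ⟨k', rfl⟩ : ∃ k', k = k' + 1 := ⟨k - 1, by omega⟩
        rw [pvP_succ_cons]
        by_cases hk : 1 ≤ k'
        · have := ih (rem - PySem.Str.len l) k' hk (by omega)
          omega
        · have : k' = 0 := by omega
          subst this
          have : pvP r 0 = 0 := rfl
          omega

lemma pvP_gt_of_gt_g (lines : List String) :
    ∀ rem k, pvG lines rem < k → k ≤ lines.length → rem < pvP lines k := by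
  induction lines with
  | nil => intro rem k h1 h2; simp at h2; omega
  | cons l r ih =>
      intro rem k h1 h2
      obtain ⟨k', rfl⟩ : ∃ k', k = k' + 1 := ⟨k - 1, by omega⟩
      rw [pvP_succ_cons]
      by_cases h : PySem.Str.len l > rem
      · have := pvP_nonneg r k'
        omega
      · simp only [pvG, if_neg h] at h1
        have := ih (rem - PySem.Str.len l) k' (by omega) (by simpa using h2)
        omega

lemma pvPrefixGo_get (lines : List String) :
    ∀ s (k : Nat), k ≤ lines.length → (pvPrefixGo s lines)[k]? = some (s + pvP lines k) := by
  induction lines with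
  | nil =>
      intro s k hk
      have hk0 : k = 0 := by simpa using hk
      subst hk0
      simp [pvPrefixGo, pvP]
  | cons l r ih =>
      intro s k hk
      match k with
      | 0 => simp [pvPrefixGo, pvP]
      | k + 1 =>
          have := ih (s + PySem.Str.len l) k (by simpa using hk)
          simp only [pvPrefixGo, List.getElem?_cons_succ, this, pvP_succ_cons]
          exact congrArg some (by ring)

lemma pvBsearch_eq_g (lines : List String) (mc : Int) :
    ∀ m : Nat, ∀ lo hi : Int, (hi - lo).toNat ≤ m → 0 ≤ lo →
      lo ≤ (pvG lines mc : Int) → (pvG lines mc : Int) ≤ hi → hi ≤ (lines.length : Int) →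
      pvBsearch (pvPrefix lines) mc lo hi = (pvG lines mc : Int) := by
  intro m
  induction m with
  | zero =>
      intro lo hi hm h0 hlo hhi hn
      rw [pvBsearch]
      rw [dif_neg (by omega)]
      omega
  | succ m ih =>
      intro lo hi hm h0 hlo hhi hn
      rw [pvBsearch]
      by_cases h : lo < hi
      · rw [dif_pos h]
        have hb := PySem.Int.floordiv_two_mid_bounds (lo := lo + 1) (hi := hi) (by omega)
        have e : lo + 1 + hi = lo + hi + 1 := by ring
        rw [e] at hb
        set mid := PySem.Int.floordiv (lo + hi + 1) 2 with hmid
        have hmid0 : 0 ≤ mid := by omega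
        have hmidn : mid.toNat ≤ lines.length := by omega
        have hget : PySem.List.pyGet? (pvPrefix lines) mid = some (0 + pvP lines mid.toNat) := by
          rw [PySem.List.pyGet?_of_nonneg _ hmid0]
          exact pvPrefixGo_get lines 0 mid.toNat hmidn
        rw [hget]
        simp only [Option.getD_some, zero_add]
        by_cases hcmp : pvP lines mid.toNat ≤ mc
        · rw [if_pos hcmp]
          have hmg : mid ≤ (pvG lines mc : Int) := by
            by_contra hcon
            have h1 : pvG lines mc < mid.toNat := by omega
            have := pvP_gt_of_gt_g lines mc mid.toNat h1 hmidn
            omega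
          exact ih mid hi (by omega) (by omega) hmg hhi hn
        · rw [if_neg hcmp]
          have hmg : (pvG lines mc : Int) ≤ mid - 1 := by
            by_contra hcon
            have h1 : 1 ≤ mid.toNat := by omega
            have h2 : mid.toNat ≤ pvG lines mc := by omega
            have := pvP_le_of_le_g lines mc mid.toNat h1 h2
            omega
          exact ih lo (mid - 1) (by omega) h0 hlo hmg (by omega)
      · rw [dif_neg h]
        omega

-- ===== VERDICT (by name: the statement is the Claim_ definition above) =====
theorem format_papers_for_self_review_spec : Claim_equal_format_papers_for_self_review := by
  intro papers max_chars _
  unfold Spec_format_papers_for_self_review format_papers_for_self_review format_papers_for_self_review_alt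
  simp only
  set lines := pvFmtLines papers 1 with hlines
  have hlen : lines.length = papers.length := pvFmtLines_len papers 1
  set g := pvG lines max_chars with hg
  have hgle : g ≤ lines.length := pvG_le lines max_chars
  have hk : pvBsearch (pvPrefix lines) max_chars 0 (PySem.List.len lines) = (g : Int) := by
    rw [PySem.List.len_eq]
    exact pvBsearch_eq_g lines max_chars (lines.length) 0 (lines.length : Int)
      (by omega) (by omega) (by exact_mod_cast Nat.zero_le g) (by exact_mod_cast hgle) le_rfl
  rw [hk]
  rw [pvLoopA_eq_pvF, sub_zero, ← hlines, pvF_char, ← hg]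
  rw [PySem.List.slice_to_natCast lines g]
  simp only [PySem.List.len_eq]
  by_cases hc : g < lines.length
  · rw [if_pos hc, if_pos (show ((g : Int) < (lines.length : Int)) by exact_mod_cast hc)]
    have harg : (papers.length : Int) - (1 + (g : Int)) + 1 = (lines.length : Int) - (g : Int) := by
      rw [hlen]; ring
    rw [harg]
  · rw [if_neg hc, if_neg (show ¬ ((g : Int) < (lines.length : Int)) by exact_mod_cast hc)]
    have : g = lines.length := by omega
    simp [this]
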